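-- pv_equiv track=rewrite | github.com/SamboHassan/python-data-structure-algorithm | basic_algorithms/prefix_sum2.py | sum_element_prefix
-- ===== SOURCE A (Python) =====
-- def sum_element_prefix(A, B):
--     """Assume that A and B have equal length.
--
--     Return the number of (counts) elements in B equal to the sum of prefix sums in A
--     """
--     n = len(A)
--     count = 0
--     for i in range(n):
--         total = 0
--         for j in range(n):
--             for k in range(1 + j):
--                 total += A[k]
--         if B[i] == total:
--             count += 1
--     return count
-- ===== SOURCE B (Python) =====
-- def sum_element_prefix(A, B):
--     total = 0
--     running = 0
--     for x in A:
--         running += x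
--         total += running
--     count = 0
--     for x in B[:len(A)]:
--         if x == total:
--             count += 1
--     return count
-- ===== Notes on version B (the rewrite author's own statement) =====
-- stated objective: faster
-- what changed: The invariant triple loop (sum of prefix sums, recomputed for every i) is replaced by one running-prefix-sum pass over A computing the total once, followed by a single counting pass over B's first len(A) elements.
import Mathlib
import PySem

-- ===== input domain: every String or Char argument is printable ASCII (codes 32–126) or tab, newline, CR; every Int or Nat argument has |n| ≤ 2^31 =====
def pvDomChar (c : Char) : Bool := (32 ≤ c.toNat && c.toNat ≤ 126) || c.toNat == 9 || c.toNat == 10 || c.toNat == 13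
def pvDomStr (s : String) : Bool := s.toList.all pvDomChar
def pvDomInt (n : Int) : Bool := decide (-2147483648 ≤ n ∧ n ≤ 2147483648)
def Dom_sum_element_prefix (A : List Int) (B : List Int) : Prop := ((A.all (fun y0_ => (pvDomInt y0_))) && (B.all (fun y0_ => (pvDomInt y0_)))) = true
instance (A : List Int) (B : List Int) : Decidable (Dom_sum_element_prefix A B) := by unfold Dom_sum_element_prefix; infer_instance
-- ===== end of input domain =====

-- B computes the (i-independent) sum of A's prefix sums once with a running sum and counts
-- matches in B's first len(A) elements in a single pass, replacing A's O(n^3) triple loop.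

-- ===== PORT A =====
def sum_element_prefix (A : List Int) (B : List Int) : Int :=
  let n : Int := A.length
  (PySem.List.pyRange 0 n 1).foldl (fun count i =>
    let total :=
      (PySem.List.pyRange 0 n 1).foldl (fun t j =>
        (PySem.List.pyRange 0 (1 + j) 1).foldl (fun t k =>
          t + PySem.List.pyGetD A k 0) t) 0
    if PySem.List.pyGetD B i 0 == total then count + 1 else count) 0

-- ===== PORT B =====
def sum_element_prefix_alt (A : List Int) (B : List Int) : Int :=
  let p := A.foldl (fun (s : Int × Int) x => (s.1 + x, s.2 + (s.1 + x))) ((0 : Int), (0 : Int))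
  (PySem.List.slice B none (some (A.length : Int))).foldl
    (fun count x => if x == p.2 then count + 1 else count) 0

-- ===== PRECONDITION & SPEC =====
-- Pre_ excludes exactly the inputs where A raises IndexError: B[i] with len(B) < len(A).
def Pre_sum_element_prefix (A : List Int) (B : List Int) : Prop := A.length ≤ B.length
instance (A : List Int) (B : List Int) : Decidable (Pre_sum_element_prefix A B) := by unfold Pre_sum_element_prefix; infer_instance
def pvWitness_sum_element_prefix : List Int × List Int := ([1, 2], [3, 9])

def Spec_sum_element_prefix (A : List Int) (B : List Int) (out : Int) : Prop := out = sum_element_prefix_alt A B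
instance (A : List Int) (B : List Int) (out : Int) : Decidable (Spec_sum_element_prefix A B out) := by unfold Spec_sum_element_prefix; infer_instance

-- ===== CLAIM (what is proved, stated in full; the proofs are below) =====
def Claim_equal_sum_element_prefix : Prop := ∀ (A : List Int) (B : List Int), Dom_sum_element_prefix A B → Pre_sum_element_prefix A B → Spec_sum_element_prefix A B (sum_element_prefix A B)

-- ===== LEMMAS AND PROOFS =====

/-- Sum of all prefix sums of `A` (prefix lengths 1 … len). -/
def totPrefix (A : List Int) : Int :=
  ((List.range A.length).map (fun j => (A.take (j + 1)).sum)).sum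

theorem take_sum_succ (A : List Int) (m : Nat) :
    (A.take (m + 1)).sum = (A.take m).sum + A.getD m 0 := by
  rw [List.take_add_one, List.sum_append, List.getD_eq_getElem?_getD]
  cases A[m]? <;> simp

theorem inner_loop_eq (A : List Int) (m : Nat) (t : Int) :
    (PySem.List.pyRange 0 (m : Int) 1).foldl (fun t k => t + PySem.List.pyGetD A k 0) t
      = t + (A.take m).sum := by
  induction m generalizing t with
  | zero => simp
  | succ m ih =>
      rw [PySem.List.pyRange_zero_nat] at ih ⊢
      rw [List.range_succ, List.map_append, List.foldl_append, ih]
      simp [take_sum_succ, add_assoc]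

theorem totPrefix_cons (x : Int) (xs : List Int) :
    totPrefix (x :: xs) = ((xs.length : Int) + 1) * x + totPrefix xs := by
  unfold totPrefix
  rw [List.length_cons, List.range_succ_eq_map, List.map_cons, List.map_map]
  simp only [Function.comp_def, Nat.succ_eq_add_one, List.take_succ_cons, List.sum_cons,
    List.take_zero, List.sum_nil, add_zero]
  rw [PySem.List.sum_map_add_int (List.range xs.length) (fun _ => x)
    (fun j => (xs.take (j + 1)).sum), PySem.List.sum_map_const_int]
  simp only [List.length_range]
  ring

theorem run_foldl (l : List Int) (r t : Int) :
    l.foldl (fun (s : Int × Int) x => (s.1 + x, s.2 + (s.1 + x))) (r, t)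
      = (r + l.sum, t + (l.length : Int) * r + totPrefix l) := by
  induction l generalizing r t with
  | nil => simp [totPrefix]
  | cons x xs ih =>
      rw [List.foldl_cons, ih, totPrefix_cons]
      simp only [List.sum_cons, List.length_cons, Prod.mk.injEq]
      constructor <;> push_cast <;> ring

theorem middle_loop_eq (A : List Int) :
    (PySem.List.pyRange 0 (A.length : Int) 1).foldl (fun t j =>
        (PySem.List.pyRange 0 (1 + j) 1).foldl (fun t k =>
          t + PySem.List.pyGetD A k 0) t) 0 = totPrefix A := by
  rw [PySem.List.pyRange_zero_nat, List.foldl_map]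
  have hbody : ∀ (t : Int) (j : Nat),
      (PySem.List.pyRange 0 (1 + (j : Int)) 1).foldl (fun t k =>
        t + PySem.List.pyGetD A k 0) t = t + (A.take (j + 1)).sum := by
    intro t j
    have := inner_loop_eq A (j + 1) t
    rwa [show ((j + 1 : Nat) : Int) = 1 + (j : Int) by push_cast; ring] at this
  simp only [hbody]
  rw [PySem.List.foldl_add]
  simp [totPrefix]

theorem map_getD_range (B : List Int) (n : Nat) (h : n ≤ B.length) :
    (List.range n).map (fun j => B.getD j 0) = B.take n := by
  apply List.ext_getElem
  · simp [h]
  · intro i h1 h2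
    simp only [List.getElem_map, List.getElem_range, List.getElem_take]
    simp only [List.length_map, List.length_range] at h1
    rw [List.getD_eq_getElem B 0 (by omega)]

-- ===== VERDICT (by name: the statement is the Claim_ definition above) =====
theorem sum_element_prefix_spec : Claim_equal_sum_element_prefix := by
  intro A B _ hPre
  unfold Spec_sum_element_prefix sum_element_prefix sum_element_prefix_alt
  simp only [run_foldl A 0 0]
  rw [middle_loop_eq A, PySem.List.slice_to_natCast, ← map_getD_range B A.length hPre,
    List.foldl_map, PySem.List.pyRange_zero_nat, List.foldl_map]
  simp [PySem.List.pyGetD_natCast]
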